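-- pv_equiv track=rewrite | github.com/jiroshimaya/retrieval-metrics | src/retrieval_metrics/core/metrics.py | _ranks_to_run_qrels
-- ===== SOURCE A (Python) =====
-- def _mask_ranks(ranks_list: list[list[int]], k: int) -> list[list[int]]:
--     """kより悪い順位を-1にする"""
--     if k < 1:
--         return ranks_list
--
--     masked_ranks_list = []
--     for ranks in ranks_list:
--         # kより悪い順位は-1にする
--         masked_ranks = []
--         for rank in ranks:
--             if rank > k:
--                 masked_ranks.append(-1)
--             else:
--                 masked_ranks.append(rank)
--         masked_ranks_list.append(masked_ranks)
--     return masked_ranks_list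
--
-- def _ranks_to_run_qrels(
--     ranks_list: list[list[int]], k: int = -1
-- ) -> tuple[dict[str, dict[str, int]], dict[str, dict[str, int]]]:
--     """Convert ranks_list to ranx format."""
--     run: dict[str, dict[str, int]] = {}
--     qrels: dict[str, dict[str, int]] = {}
--
--     ranks_list = _mask_ranks(ranks_list, k)
--
--     for qid, ranks in enumerate(ranks_list):
--         run[str(qid)] = {}
--         qrels[str(qid)] = {}
--         ranks_max = max(ranks)
--         max_rank = ranks_max if k < 0 else min(max(ranks_max, 0), k)
--
--         for doc_id in range(1, max_rank + 1):
--             # runを作る。doc_idは1からmax_rankまでで、doc1が1位でdoc{max_rank}が最下位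
--             run[str(qid)][f"doc{doc_id}"] = max_rank + 1 - doc_id
--             # qrelsを作る。順位がranksに含まれるdoc_idは関連性1、それ以外は0
--             if doc_id in ranks:
--                 qrels[str(qid)][f"doc{doc_id}"] = 1
--         # -1の文書をdummyとしてqrels二追加
--         # ranksの中の-1の個数を数える
--         out_of_ranks_count = ranks.count(-1)
--         for i in range(1, out_of_ranks_count + 1):
--             # runには含まれないが、qrelsには関連性1の文書を追加
--             qrels[str(qid)][f"doc{max_rank + i}"] = 1
--
--     return run, qrels
-- ===== SOURCE B (Python) =====
-- def _query_run_qrels(ranks, k):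
--     """Build (run, qrels) inner dicts for one query."""
--     if k >= 1:
--         ranks = [-1 if r > k else r for r in ranks]
--     ranks_max = max(ranks)
--     max_rank = ranks_max if k < 0 else min(max(ranks_max, 0), k)
--     run_q = {f"doc{d}": max_rank + 1 - d for d in range(1, max_rank + 1)}
--     rel = sorted({r for r in ranks if 1 <= r <= max_rank})
--     dummies = [max_rank + i for i in range(1, ranks.count(-1) + 1)]
--     qrels_q = {f"doc{d}": 1 for d in rel + dummies}
--     return run_q, qrels_q
--
--
-- def _ranks_to_run_qrels(ranks_list, k=-1):
--     per_query = [_query_run_qrels(ranks, k) for ranks in ranks_list]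
--     run = {str(q): rq[0] for q, rq in enumerate(per_query)}
--     qrels = {str(q): rq[1] for q, rq in enumerate(per_query)}
--     return run, qrels
-- ===== Notes on version B (the rewrite author's own statement) =====
-- stated objective: faster
-- what changed: qrels relevance keys are obtained by sorting the distinct in-range rank values instead of scanning range(1, max_rank+1) with an O(len(ranks)) membership test per doc_id; masking is inlined per query and the per-query (run, qrels) pairs are assembled into the outer dicts in a final pass.
import Mathlib
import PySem

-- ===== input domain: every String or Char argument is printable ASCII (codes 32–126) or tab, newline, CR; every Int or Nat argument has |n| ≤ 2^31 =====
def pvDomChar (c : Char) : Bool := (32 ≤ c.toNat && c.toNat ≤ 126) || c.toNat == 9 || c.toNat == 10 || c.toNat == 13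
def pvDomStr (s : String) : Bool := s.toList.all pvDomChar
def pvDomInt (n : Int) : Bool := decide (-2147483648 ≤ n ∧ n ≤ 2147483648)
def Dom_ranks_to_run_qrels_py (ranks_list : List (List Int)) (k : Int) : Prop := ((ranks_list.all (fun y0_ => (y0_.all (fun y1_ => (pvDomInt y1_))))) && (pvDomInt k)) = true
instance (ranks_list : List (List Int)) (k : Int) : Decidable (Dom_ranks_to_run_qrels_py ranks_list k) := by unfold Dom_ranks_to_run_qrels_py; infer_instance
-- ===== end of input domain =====

-- B builds the qrels relevance keys by sorting the distinct in-range rank values instead of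
-- scanning range(1, max_rank+1) with a per-element membership test over ranks (measured faster).

-- ===== PORT A =====
-- _mask_ranks, literal: append loops
def pvMaskA (ranks_list : List (List Int)) (k : Int) : List (List Int) :=
  if k < 1 then ranks_list
  else ranks_list.foldl (fun acc ranks =>
    acc ++ [ranks.foldl (fun m r => m ++ [if r > k then (-1 : Int) else r]) []]) []

-- body of A's per-query loop (all dict keys inserted are fresh, so dicts are appended assoc lists);
-- max(ranks) is Python max — Pre_ excludes the empty list, where Python raises ValueError
def pvQueryA (ranks : List Int) (k : Int) : List (String × Int) × List (String × Int) :=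
  let ranks_max := (PySem.List.max? ranks (fun x => x)).getD 0
  let max_rank := if k < 0 then ranks_max else min (max ranks_max 0) k
  let rq := (PySem.List.pyRange 1 (max_rank + 1) 1).foldl
      (fun (p : List (String × Int) × List (String × Int)) doc_id =>
        (p.1 ++ [("doc" ++ PySem.Int.toStr doc_id, max_rank + 1 - doc_id)],
         if doc_id ∈ ranks then p.2 ++ [("doc" ++ PySem.Int.toStr doc_id, (1 : Int))] else p.2))
      ([], [])
  let out_of_ranks_count := PySem.List.count ranks (-1)
  (rq.1, (PySem.List.pyRange 1 (out_of_ranks_count + 1) 1).foldl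
      (fun q i => q ++ [("doc" ++ PySem.Int.toStr (max_rank + i), (1 : Int))]) rq.2)

def ranks_to_run_qrels_py (ranks_list : List (List Int)) (k : Int) : (List (String × List (String × Int))) × (List (String × List (String × Int))) :=
  let rl := pvMaskA ranks_list k
  (PySem.List.enumerate rl 0).foldl
    (fun (acc : List (String × List (String × Int)) × List (String × List (String × Int))) q =>
      (acc.1 ++ [(PySem.Int.toStr q.1, (pvQueryA q.2 k).1)],
       acc.2 ++ [(PySem.Int.toStr q.1, (pvQueryA q.2 k).2)]))
    ([], [])

-- ===== PORT B =====
-- _query_run_qrels from Source B: mask inline, run as a comprehension over the range,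
-- qrels keys = sorted distinct in-range rank values, then the dummy docs
def pvQueryB (ranks0 : List Int) (k : Int) : List (String × Int) × List (String × Int) :=
  let ranks := if k ≥ 1 then ranks0.map (fun r => if r > k then (-1 : Int) else r) else ranks0
  let ranks_max := (PySem.List.max? ranks (fun x => x)).getD 0
  let max_rank := if k < 0 then ranks_max else min (max ranks_max 0) k
  let run_q := (PySem.List.pyRange 1 (max_rank + 1) 1).map
      (fun d => ("doc" ++ PySem.Int.toStr d, max_rank + 1 - d))
  let rel := PySem.List.sorted
      (PySem.Set.ofList (ranks.filter (fun r => decide (1 ≤ r ∧ r ≤ max_rank)))) (fun x => x)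
  let dummies := (PySem.List.pyRange 1 (PySem.List.count ranks (-1) + 1) 1).map
      (fun i => max_rank + i)
  (run_q, (rel ++ dummies).map (fun d => ("doc" ++ PySem.Int.toStr d, (1 : Int))))

def ranks_to_run_qrels_py_alt (ranks_list : List (List Int)) (k : Int) : (List (String × List (String × Int))) × (List (String × List (String × Int))) :=
  let per_query := ranks_list.map (fun ranks => pvQueryB ranks k)
  ((PySem.List.enumerate per_query 0).map (fun q => (PySem.Int.toStr q.1, q.2.1)),
   (PySem.List.enumerate per_query 0).map (fun q => (PySem.Int.toStr q.1, q.2.2)))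

-- ===== PRECONDITION & SPEC =====
-- Pre_ excludes inputs containing an empty ranks list: there Python's max(ranks) raises ValueError.
def Pre_ranks_to_run_qrels_py (ranks_list : List (List Int)) (k : Int) : Prop :=
  ∀ ranks ∈ ranks_list, ranks ≠ []
instance (ranks_list : List (List Int)) (k : Int) : Decidable (Pre_ranks_to_run_qrels_py ranks_list k) := by unfold Pre_ranks_to_run_qrels_py; infer_instance

def pvWitness_ranks_to_run_qrels_py : List (List Int) × Int := ([[1], [3, -1, 2]], 2)

def Spec_ranks_to_run_qrels_py (ranks_list : List (List Int)) (k : Int) (out : (List (String × List (String × Int))) × (List (String × List (String × Int)))) : Prop := out = ranks_to_run_qrels_py_alt ranks_list k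
instance (ranks_list : List (List Int)) (k : Int) (out : (List (String × List (String × Int))) × (List (String × List (String × Int)))) : Decidable (Spec_ranks_to_run_qrels_py ranks_list k out) := by unfold Spec_ranks_to_run_qrels_py; infer_instance

-- ===== CLAIM (what is proved, stated in full; the proofs are below) =====
def Claim_equal_ranks_to_run_qrels_py : Prop := ∀ (ranks_list : List (List Int)) (k : Int), Dom_ranks_to_run_qrels_py ranks_list k → Pre_ranks_to_run_qrels_py ranks_list k → Spec_ranks_to_run_qrels_py ranks_list k (ranks_to_run_qrels_py ranks_list k)

-- ===== LEMMAS AND PROOFS =====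

-- enumerate of a mapped list
theorem pv_enumerate_map {α β : Type} (f : α → β) (l : List α) (s : Int) :
    PySem.List.enumerate (l.map f) s
      = (PySem.List.enumerate l s).map (fun q => (q.1, f q.2)) := by
  induction l generalizing s with
  | nil => simp [PySem.List.enumerate_nil]
  | cons x t ih => simp [PySem.List.enumerate_cons, ih]

-- the heart of the equivalence: scanning range(1, mr+1) with a membership test yields exactly
-- the sorted distinct in-range rank values
theorem pv_filter_range_eq_sorted (m : List Int) (mr : Int) :
    PySem.List.sorted
        (PySem.Set.ofList (m.filter (fun r => decide (1 ≤ r ∧ r ≤ mr)))) (fun x => x)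
      = (PySem.List.pyRange 1 (mr + 1) 1).filter (fun d => decide (d ∈ m)) := by
  apply PySem.List.sorted_eq_of_perm_of_pairwise_lt
  · rw [List.perm_ext_iff_of_nodup
      ((PySem.List.nodup_pyRange_one 1 (mr + 1)).filter _) (PySem.Set.nodup_ofList _)]
    intro a
    simp only [List.mem_filter, PySem.List.mem_pyRange_one, PySem.Set.mem_ofList,
      decide_eq_true_eq]
    constructor
    · rintro ⟨⟨h1, h2⟩, h3⟩; exact ⟨h3, h1, by omega⟩
    · rintro ⟨h3, h1, h2⟩; exact ⟨⟨h1, by omega⟩, h3⟩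
  · exact (PySem.List.pairwise_lt_pyRange_one 1 (mr + 1)).filter _

-- the per-query bodies agree, given the masked list
theorem pv_query_eq (m : List Int) (k : Int)
    (hm : (if k ≥ 1 then m.map (fun r => if r > k then (-1 : Int) else r) else m) = m) :
    pvQueryA m k = pvQueryB m k := by
  unfold pvQueryA pvQueryB
  rw [hm]
  simp only []
  rw [PySem.List.foldl_prod_mk
        (f := fun p1 doc_id =>
          p1 ++ [("doc" ++ PySem.Int.toStr doc_id,
            (if k < 0 then (PySem.List.max? m fun x => x).getD 0
             else min (max ((PySem.List.max? m fun x => x).getD 0) 0) k) + 1 - doc_id)])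
        (g := fun p2 doc_id =>
          if doc_id ∈ m then p2 ++ [("doc" ++ PySem.Int.toStr doc_id, (1 : Int))] else p2)]
  have hg : ∀ R : List Int,
      R.foldl (fun p2 doc_id =>
          if doc_id ∈ m then p2 ++ [("doc" ++ PySem.Int.toStr doc_id, (1 : Int))] else p2) []
        = (R.filter (fun d => decide (d ∈ m))).map
            (fun d => ("doc" ++ PySem.Int.toStr d, (1 : Int))) := by
    intro R
    have := PySem.List.foldl_append_if (fun d => decide (d ∈ m))
      (fun d => ("doc" ++ PySem.Int.toStr d, (1 : Int))) R []
    simpa using this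
  rw [hg, PySem.List.foldl_append_singleton_eq_map, PySem.List.foldl_append_singleton_eq_map,
    ← pv_filter_range_eq_sorted m _]
  simp [List.map_map, Function.comp]

-- when k ≥ 1, A's _mask_ranks is the per-element map
theorem pv_mask_eq (ranks_list : List (List Int)) (k : Int) (hk : ¬ k < 1) :
    pvMaskA ranks_list k
      = ranks_list.map (fun ranks => ranks.map (fun r => if r > k then (-1 : Int) else r)) := by
  unfold pvMaskA
  rw [if_neg hk]
  have h1 : ∀ ranks : List Int,
      List.foldl (fun m r => m ++ [if r > k then (-1 : Int) else r]) [] ranks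
        = ranks.map (fun r => if r > k then (-1 : Int) else r) := fun ranks => by
    simpa using PySem.List.foldl_append_singleton_eq_map
      (fun r => if r > k then (-1 : Int) else r) ranks []
  simp only [h1]
  simpa using PySem.List.foldl_append_singleton_eq_map
    (fun ranks : List Int => ranks.map (fun r => if r > k then (-1 : Int) else r)) ranks_list []

-- ===== VERDICT (by name: the statement is the Claim_ definition above) =====
theorem ranks_to_run_qrels_py_spec : Claim_equal_ranks_to_run_qrels_py := by
  intro ranks_list k _ _
  unfold Spec_ranks_to_run_qrels_py ranks_to_run_qrels_py ranks_to_run_qrels_py_alt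
  simp only []
  rw [PySem.List.foldl_prod_mk
        (f := fun a1 (q : Int × List Int) =>
          a1 ++ [(PySem.Int.toStr q.1, (pvQueryA q.2 k).1)])
        (g := fun a2 (q : Int × List Int) =>
          a2 ++ [(PySem.Int.toStr q.1, (pvQueryA q.2 k).2)]),
      PySem.List.foldl_append_singleton_eq_map, PySem.List.foldl_append_singleton_eq_map,
      pv_enumerate_map]
  by_cases hk : k < 1
  · have hmask : pvMaskA ranks_list k = ranks_list := by unfold pvMaskA; rw [if_pos hk]
    have hq : ∀ m : List Int, pvQueryA m k = pvQueryB m k := fun m =>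
      pv_query_eq m k (by rw [if_neg (by omega)])
    simp [hmask, hq, List.map_map, Function.comp]
  · rw [pv_mask_eq ranks_list k hk, pv_enumerate_map]
    have hq : ∀ m : List Int,
        pvQueryA (m.map (fun r => if r > k then (-1 : Int) else r)) k
          = pvQueryB m k := by
      intro m
      have hk1 : k ≥ 1 := by omega
      have hfix : (m.map (fun r => if r > k then (-1 : Int) else r)).map
            (fun r => if r > k then (-1 : Int) else r)
          = m.map (fun r => if r > k then (-1 : Int) else r) := by
        rw [List.map_map]; apply List.map_congr_left; intro r _
        by_cases h : r > k <;> simp [h]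
      rw [pv_query_eq (m.map (fun r => if r > k then (-1 : Int) else r)) k
        (by rw [if_pos hk1, hfix])]
      simp only [pvQueryB, if_pos hk1, hfix]
    simp [hq, List.map_map, Function.comp]
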